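-- pv_equiv track=rewrite | github.com/XELIS-Forge/Proof-of-Concepts | Mineable Token/xelis_contract_miner_sha256.py | decode_xet_address
-- ===== SOURCE A (Python) =====
-- def decode_xet_address(address):
--     # Bech32 charset
--     charset = "qpzry9x8gf2tvdw0s3jn54khce6mua7l"
--
--     # Get the data part after colon
--     _, data_part = address.split(':')
--
--     # Decode each character to its 5-bit value
--     data_5bit = [charset.index(c) for c in data_part]
--
--     # Convert from 5-bit to 8-bit (without padding at the end)
--     acc = 0
--     bits = 0
--     result = []
--
--     for value in data_5bit:
--         acc = (acc << 5) | value
--         bits += 5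
--
--         while bits >= 8:
--             bits -= 8
--             result.append((acc >> bits) & 0xFF)
--
--     result = [0] + result[:33]
--     return result
-- ===== SOURCE B (Python) =====
-- def decode_xet_address(address):
--     charset = "qpzry9x8gf2tvdw0s3jn54khce6mua7l"
--     _, data_part = address.split(':')
--     num = 0
--     for c in data_part:
--         num = (num << 5) | charset.index(c)
--     total_bits = 5 * len(data_part)
--     nbytes = total_bits // 8
--     result = [(num >> (total_bits - 8 * (i + 1))) & 0xFF for i in range(nbytes)]
--     return [0] + result[:33]
-- ===== Notes on version B (the rewrite author's own statement) =====
-- stated objective: alternative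
-- what changed: A streams bytes out of a shifting accumulator with an inner while-loop during the 5-bit fold; B first folds all 5-bit values into one big integer and then extracts each byte by indexed shift in a separate pass over range(total_bits//8).
import Mathlib
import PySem

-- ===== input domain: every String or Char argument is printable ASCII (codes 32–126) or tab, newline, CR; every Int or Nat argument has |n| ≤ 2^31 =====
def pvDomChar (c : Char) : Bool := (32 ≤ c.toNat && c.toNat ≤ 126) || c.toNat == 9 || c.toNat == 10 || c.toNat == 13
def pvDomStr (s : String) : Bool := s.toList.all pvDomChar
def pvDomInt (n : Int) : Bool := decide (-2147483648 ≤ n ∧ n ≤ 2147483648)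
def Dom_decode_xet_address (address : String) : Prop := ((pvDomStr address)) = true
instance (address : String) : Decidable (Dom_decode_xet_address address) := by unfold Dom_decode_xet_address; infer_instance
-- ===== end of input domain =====

-- B replaces A's streaming accumulator/while-loop byte emission by one big-integer fold
-- followed by an indexed byte-extraction pass (different decomposition, same exact values).

-- ===== PORT A =====
-- the bech32 charset
-- "qpzry9x8gf2tvdw0s3jn54khce6mua7l" as an explicit char list (kernel-friendly literal)
def pvCharset : List Char :=
  ['q','p','z','r','y','9','x','8','g','f','2','t','v','d','w','0',
   's','3','j','n','5','4','k','h','c','e','6','m','u','a','7','l']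

-- charset.index(c); total form (getD 0), used only under Pre_ (c ∈ charset, so index? = some _)
def pvIdx (c : Char) : Nat := (PySem.List.index? pvCharset c).getD 0

-- _, data_part = address.split(':'); total form, used only under Pre_ (exactly two parts)
def pvParts (address : String) : List String := (PySem.Str.split? address ":").getD []

-- the inner 'while bits >= 8' loop of A (acc, bits are nonnegative Python ints; Nat is exact here)
def pvAWhile (acc : Nat) (bits : Nat) (res : List Int) : Nat × List Int :=
  if bits ≥ 8 then
    pvAWhile acc (bits - 8) (res ++ [(((acc >>> (bits - 8)) &&& 255 : Nat) : Int)])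
  else (bits, res)
termination_by bits
decreasing_by omega

-- one iteration of A's 'for value in data_5bit' loop; state = (acc, bits, result)
def pvAStep (st : Nat × Nat × List Int) (v : Nat) : Nat × Nat × List Int :=
  let acc := (st.1 <<< 5) ||| v
  let bits := st.2.1 + 5
  let r := pvAWhile acc bits st.2.2
  (acc, r.1, r.2)

def decode_xet_address (address : String) : List Int :=
  let data_part := (pvParts address).getD 1 ""
  let data_5bit := data_part.toList.map pvIdx
  let st := data_5bit.foldl pvAStep (0, 0, [])
  (0 : Int) :: st.2.2.take 33

-- ===== PORT B =====
def decode_xet_address_alt (address : String) : List Int :=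
  let data_part := (pvParts address).getD 1 ""
  let num := data_part.toList.foldl (fun n c => (n <<< 5) ||| pvIdx c) 0
  let total_bits := 5 * data_part.toList.length
  let nbytes := total_bits / 8     -- both operands nonneg: Nat division is exact for Python's //
  let result := (PySem.List.pyRange 0 (nbytes : Int) 1).map
    (fun i => (((num >>> ((total_bits : Int) - 8 * (i + 1)).toNat) &&& 255 : Nat) : Int))
    -- the shift amount total_bits - 8*(i+1) is ≥ 0 for every i in range(nbytes), so .toNat is exact
  (0 : Int) :: result.take 33

-- ===== PRECONDITION & SPEC =====
-- Pre_ excludes exactly the inputs on which Python A raises ValueError: an address without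
-- exactly one ':' (the 2-tuple unpacking fails) or whose data part has a char outside the charset.
def Pre_decode_xet_address (address : String) : Prop :=
  address.toList.count ':' = 1 ∧
    (address.toList.dropWhile (fun c => !(c == ':'))).tail.all
      (fun c => pvCharset.contains c) = true
instance (address : String) : Decidable (Pre_decode_xet_address address) := by
  unfold Pre_decode_xet_address; infer_instance

def pvWitness_decode_xet_address : String := "xet:qq"

def Spec_decode_xet_address (address : String) (out : List Int) : Prop := out = decode_xet_address_alt address
instance (address : String) (out : List Int) : Decidable (Spec_decode_xet_address address out) := by unfold Spec_decode_xet_address; infer_instance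

-- ===== CLAIM (what is proved, stated in full; the proofs are below) =====
def Claim_equal_decode_xet_address : Prop := ∀ (address : String), Dom_decode_xet_address address → Pre_decode_xet_address address → Spec_decode_xet_address address (decode_xet_address address)

-- ===== LEMMAS AND PROOFS =====

-- the big number accumulated from the 5-bit values
def pvNum (vs : List Nat) : Nat := vs.foldl (fun n v => (n <<< 5) ||| v) 0

lemma pvIdx_lt (c : Char) : pvIdx c < 32 := by
  unfold pvIdx
  cases h : PySem.List.index? pvCharset c with
  | none => simp
  | some k =>
    obtain ⟨hk, -, -⟩ := PySem.List.getElem_of_index?_eq_some h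
    have h32 : pvCharset.length = 32 := by decide
    simpa using hk.trans_le (le_of_eq h32)

lemma pvShift5 (n v : Nat) (hv : v < 32) : (n <<< 5) ||| v = n * 32 + v := by
  rw [Nat.shiftLeft_eq]
  have := Nat.two_pow_add_eq_or_of_lt (i := 5) (b := v) (by omega) n
  simpa [Nat.mul_comm] using this.symm

lemma pvNum_append (vs : List Nat) (v : Nat) :
    pvNum (vs ++ [v]) = (pvNum vs <<< 5) ||| v := by
  simp [pvNum]

-- appended low bits do not change a byte above them
lemma pvByte_stable (N v s : Nat) (hv : v < 32) :
    ((N <<< 5) ||| v) >>> (s + 5) = N >>> s := by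
  rw [pvShift5 N v hv, Nat.shiftRight_eq_div_pow, Nat.shiftRight_eq_div_pow]
  have h1 : (2 : Nat) ^ (s + 5) = 32 * 2 ^ s := by rw [pow_add]; ring
  rw [h1, ← Nat.div_div_eq_div_mul, Nat.mul_comm N 32, Nat.mul_add_div (by norm_num),
    Nat.div_eq_of_lt hv, Nat.add_zero]

-- the byte list after processing vs
def pvBytes (vs : List Nat) : List Int :=
  (List.range (5 * vs.length / 8)).map
    (fun i => (((pvNum vs >>> (5 * vs.length - 8 * (i + 1))) &&& 255 : Nat) : Int))

-- invariant of A's loop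
lemma pvALoop (vs : List Nat) (h : ∀ v ∈ vs, v < 32) :
    vs.foldl pvAStep (0, 0, []) = (pvNum vs, 5 * vs.length % 8, pvBytes vs) := by
  induction vs using List.reverseRecOn with
  | nil => simp [pvNum, pvBytes]
  | append_singleton vs v ih =>
    have hv : v < 32 := h v (by simp)
    have ih' := ih (fun x hx => h x (by simp [hx]))
    rw [List.foldl_append, ih']
    have hnum : pvNum (vs ++ [v]) = (pvNum vs <<< 5) ||| v := pvNum_append vs v
    have hb : 5 * vs.length % 8 < 8 := Nat.mod_lt _ (by norm_num)
    have hlen : (vs ++ [v]).length = vs.length + 1 := by simp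
    have hbyte : ∀ i, 8 * (i + 1) ≤ 5 * vs.length →
        (((pvNum (vs ++ [v]) >>> (5 * (vs.length + 1) - 8 * (i + 1))) &&& 255 : Nat) : Int)
          = (((pvNum vs >>> (5 * vs.length - 8 * (i + 1))) &&& 255 : Nat) : Int) := by
      intro i hi
      have h5 : 5 * (vs.length + 1) - 8 * (i + 1) = (5 * vs.length - 8 * (i + 1)) + 5 := by omega
      rw [h5, hnum, pvByte_stable _ _ _ hv]
    simp only [List.foldl_cons, List.foldl_nil]
    show pvAStep (pvNum vs, 5 * vs.length % 8, pvBytes vs) v = _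
    unfold pvAStep
    dsimp only
    by_cases hcase : 5 * vs.length % 8 ≥ 3
    · have h58 : 5 * vs.length % 8 + 5 ≥ 8 := by omega
      have h58' : ¬ (5 * vs.length % 8 + 5 - 8 ≥ 8) := by omega
      rw [pvAWhile.eq_def, if_pos h58, pvAWhile.eq_def, if_neg h58']
      have hmod : 5 * (vs.length + 1) % 8 = 5 * vs.length % 8 + 5 - 8 := by omega
      have hdiv : 5 * (vs.length + 1) / 8 = 5 * vs.length / 8 + 1 := by omega
      refine Prod.ext (by simpa using hnum.symm) (Prod.ext (by simpa [hlen] using hmod.symm) ?_)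
      show pvBytes vs ++ [_] = pvBytes (vs ++ [v])
      unfold pvBytes
      rw [hlen, hdiv, List.range_succ, List.map_append]
      congr 1
      · refine (List.map_congr_left (fun i hi => ?_)).symm
        exact hbyte i (by have := List.mem_range.mp hi; omega)
      · simp only [List.map_cons, List.map_nil]
        have h1 : 5 * (vs.length + 1) - 8 * (5 * vs.length / 8 + 1)
            = 5 * vs.length % 8 + 5 - 8 := by omega
        rw [hnum, h1]
    · have h58 : ¬ (5 * vs.length % 8 + 5 ≥ 8) := by omega
      rw [pvAWhile.eq_def, if_neg h58]
      have hmod : 5 * (vs.length + 1) % 8 = 5 * vs.length % 8 + 5 := by omega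
      have hdiv : 5 * (vs.length + 1) / 8 = 5 * vs.length / 8 := by omega
      refine Prod.ext (by simpa using hnum.symm) (Prod.ext (by simpa [hlen] using hmod.symm) ?_)
      show pvBytes vs = pvBytes (vs ++ [v])
      unfold pvBytes
      rw [hlen, hdiv]
      refine (List.map_congr_left (fun i hi => ?_)).symm
      exact hbyte i (by have := List.mem_range.mp hi; omega)

-- ===== VERDICT (by name: the statement is the Claim_ definition above) =====
theorem decode_xet_address_spec : Claim_equal_decode_xet_address := by
  intro address _ _
  show decode_xet_address address = decode_xet_address_alt address
  unfold decode_xet_address decode_xet_address_alt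
  dsimp only
  generalize ((pvParts address).getD 1 "").toList = cs
  have hloop := pvALoop (cs.map pvIdx) (by
    intro v hv
    obtain ⟨c, -, rfl⟩ := List.mem_map.mp hv
    exact pvIdx_lt c)
  rw [hloop]
  have hnum : pvNum (cs.map pvIdx) = cs.foldl (fun n c => (n <<< 5) ||| pvIdx c) 0 :=
    List.foldl_map ..
  congr 1
  unfold pvBytes
  rw [List.length_map, PySem.List.pyRange_one]
  rw [List.map_map]
  refine congrArg (List.take 33) (List.map_congr_left (fun k hk => ?_))
  have hk' : k < 5 * cs.length / 8 := List.mem_range.mp hk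
  have h8 : 8 * (k + 1) ≤ 5 * cs.length := by omega
  have hsh : (((5 * cs.length : Nat) : Int) - 8 * ((0 : Int) + (k : Int) + 1)).toNat
      = 5 * cs.length - 8 * (k + 1) := by push_cast; omega
  simp only [Function.comp, hnum.symm, hsh]
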